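-- pv_equiv track=rewrite | github.com/Jay7221/Python_Projects | Beginning Projects/Problem_solving_Algo_Ch1.py | anagram_solution1
-- ===== SOURCE A (Python) =====
-- def anagram_solution1(s1, s2):
--     '''Checks if s1 and s2 are anagrams.'''
--     a_list = list(s2)
--     pos1 = 0
--     still_ok = True
--     while pos1 < len(s1) and still_ok:
--         pos2 = 0
--         found = False
--         while pos2 < len(a_list) and not found:
--             if s1[pos1] == a_list[pos2]:
--                 found = True
--             else:
--                 pos2 += 1
--
--         if found:
--             a_list[pos2] = None
--         else:
--             still_ok = False
--
--         pos1 += 1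
--     return still_ok
-- ===== SOURCE B (Python) =====
-- def anagram_solution1(s1, s2):
--     '''Checks if s1 and s2 are anagrams.'''
--     counts = {}
--     for ch in s2:
--         counts[ch] = counts.get(ch, 0) + 1
--     for ch in s1:
--         n = counts.get(ch, 0)
--         if n == 0:
--             return False
--         counts[ch] = n - 1
--     return True
-- ===== Notes on version B (the rewrite author's own statement) =====
-- stated objective: faster
-- what changed: Replaces A's per-character linear scan-and-mark of a copied list with a character-count dictionary built once over s2 and decremented per character of s1.
import Mathlib
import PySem

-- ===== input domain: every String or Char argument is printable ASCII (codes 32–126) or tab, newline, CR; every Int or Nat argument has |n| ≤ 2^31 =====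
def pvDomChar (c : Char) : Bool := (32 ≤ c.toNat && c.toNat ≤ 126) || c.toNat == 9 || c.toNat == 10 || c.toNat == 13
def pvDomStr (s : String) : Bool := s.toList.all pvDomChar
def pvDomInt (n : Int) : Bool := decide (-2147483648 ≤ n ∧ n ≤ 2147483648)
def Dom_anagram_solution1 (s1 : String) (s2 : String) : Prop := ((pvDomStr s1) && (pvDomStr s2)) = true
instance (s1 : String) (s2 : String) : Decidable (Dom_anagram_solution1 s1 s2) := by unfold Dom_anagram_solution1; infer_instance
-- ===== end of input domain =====

-- B replaces A's per-character scan-and-mark of s2's list with a count dictionary over s2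
-- decremented per character of s1 (objective: faster, O(n+m) vs O(n*m)).


-- ===== PORT A =====
-- inner while loop: scan a_list for the first slot equal to `some c`; on success set it to `none`
def pvFindMark (c : Char) : List (Option Char) → Option (List (Option Char))
  | [] => none
  | x :: xs => if x = some c then some (none :: xs) else (pvFindMark c xs).map (x :: ·)

-- outer while loop over s1 with state (a_list, still_ok); still_ok = False exits, so return false
def pvALoop : List Char → List (Option Char) → Bool
  | [], _ => true
  | c :: rest, l =>
    match pvFindMark c l with
    | some l' => pvALoop rest l'
    | none => false

def anagram_solution1 (s1 : String) (s2 : String) : Bool :=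
  pvALoop s1.toList (s2.toList.map some)

-- ===== PORT B =====
-- second loop of Source B: consume one count per character of s1
def pvBLoop : List Char → PySem.Dict Char Int → Bool
  | [], _ => true
  | c :: rest, d =>
    let n := d.getD c 0
    if n == 0 then false else pvBLoop rest (d.insert c (n - 1))

def anagram_solution1_alt (s1 : String) (s2 : String) : Bool :=
  pvBLoop s1.toList
    (s2.toList.foldl (fun d x => d.insert x (d.getD x 0 + 1)) PySem.Dict.empty)

-- ===== PRECONDITION & SPEC =====
def Spec_anagram_solution1 (s1 : String) (s2 : String) (out : Bool) : Prop := out = anagram_solution1_alt s1 s2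
instance (s1 : String) (s2 : String) (out : Bool) : Decidable (Spec_anagram_solution1 s1 s2 out) := by unfold Spec_anagram_solution1; infer_instance

-- ===== CLAIM (what is proved, stated in full; the proofs are below) =====
def Claim_equal_anagram_solution1 : Prop := ∀ (s1 : String) (s2 : String), Dom_anagram_solution1 s1 s2 → Spec_anagram_solution1 s1 s2 (anagram_solution1 s1 s2)

-- ===== LEMMAS AND PROOFS =====

theorem pvFindMark_none_iff (c : Char) (l : List (Option Char)) :
    pvFindMark c l = none ↔ l.count (some c) = 0 := by
  induction l with
  | nil => simp [pvFindMark]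
  | cons x xs ih =>
    simp only [pvFindMark, List.count_cons]
    by_cases h : x = some c <;> simp [h, ih, Option.map_eq_none_iff, beq_iff_eq]

theorem pvFindMark_count (c : Char) (l l' : List (Option Char))
    (h : pvFindMark c l = some l') (c' : Char) :
    (l'.count (some c') : Int) = l.count (some c') - (if c' = c then 1 else 0) := by
  induction l generalizing l' with
  | nil => simp [pvFindMark] at h
  | cons x xs ih =>
    simp only [pvFindMark] at h
    by_cases hx : x = some c
    · simp [hx] at h
      subst h
      rcases eq_or_ne c' c with hc | hc
      · subst hc
        simp [hx]
      · have hcc : (some c : Option Char) ≠ some c' := by simpa using (Ne.symm hc)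
        simp [hx, hc, hcc]
    · simp only [if_neg hx, Option.map_eq_some_iff] at h
      obtain ⟨t, ht, rfl⟩ := h
      have := ih t ht
      by_cases hc : x = some c'
      · simp [hc, this]; omega
      · simp [hc, this]

theorem loop_eq (cs : List Char) (l : List (Option Char)) (d : PySem.Dict Char Int)
    (hinv : ∀ c, d.getD c 0 = (l.count (some c) : Int)) :
    pvALoop cs l = pvBLoop cs d := by
  induction cs generalizing l d with
  | nil => rfl
  | cons c rest ih =>
    simp only [pvALoop, pvBLoop]
    cases hfm : pvFindMark c l with
    | none =>
      have h0 : l.count (some c) = 0 := (pvFindMark_none_iff c l).mp hfm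
      have : d.getD c 0 = 0 := by rw [hinv c, h0]; rfl
      simp [this]
    | some l' =>
      have hpos : l.count (some c) ≠ 0 := by
        intro h0
        rw [(pvFindMark_none_iff c l).mpr h0] at hfm; simp at hfm
      have hne : d.getD c 0 ≠ 0 := by
        rw [hinv c]; exact_mod_cast hpos
      simp only [beq_iff_eq, if_neg hne]
      apply ih
      intro c'
      rw [PySem.Dict.getD_insert]
      rcases eq_or_ne c' c with hc | hc
      · simp [hc, pvFindMark_count c l l' hfm c, hinv c]
      · simp [hc, pvFindMark_count c l l' hfm c', hinv c']

theorem count_map_some (c : Char) (l : List Char) :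
    (l.map some).count (some c) = l.count c := by
  induction l with
  | nil => rfl
  | cons x xs ih => simp [List.count_cons, ih]

-- ===== VERDICT (by name: the statement is the Claim_ definition above) =====
theorem anagram_solution1_spec : Claim_equal_anagram_solution1 := by
  intro s1 s2 _
  unfold Spec_anagram_solution1 anagram_solution1 anagram_solution1_alt
  apply loop_eq
  intro c
  rw [PySem.Dict.foldl_insert_getD_add_one_eq_counter, PySem.Dict.getD_counter,
    count_map_some]
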